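-- pv_equiv track=rewrite | github.com/xsl-zf/other-projects | python/课堂练习1/main.py | jishu
-- ===== SOURCE A (Python) =====
-- def jishu(n, nk,glr):
--     c = 0
--     d = 0
--     sum = 0
--     i = 0
--     while i < n:
--         c = c + 1
--         d = d + 1
--         i = i + 1
--         if c == d :
--             sum = sum+1
--         if c == nk:
--             c=0
--         if d == glr:
--             d=0
--     return sum
-- ===== SOURCE B (Python) =====
-- def jishu(n, nk, glr):
--     # The counters agree at step i exactly when i mod lcm(nk, glr) < min(nk, glr):
--     # count full periods, then the remainder of the last partial one.
--     if n <= 0: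
--         return 0
--     a, b = nk, glr
--     while b:
--         a, b = b, a % b
--     lcm = nk // a * glr
--     m = min(nk, glr)
--     return n // lcm * m + min(n % lcm, m)
-- ===== Notes on version B (the rewrite author's own statement) =====
-- stated objective: faster
-- what changed: Replaces the step-by-step simulation of both modular counters with a closed form (the counters agree exactly when i mod lcm(nk,glr) < min(nk,glr)) computed via Euclid's gcd, one division and one remainder; Pre_ excludes nonpositive periods nk or glr, where a 'period' is meaningless (A's counters simply never reset, an accident of its loop) and B's lcm-based algorithm divides by zero or does not apply (B returns 0 for n <= 0 regardless, so those stay inside Pre_).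
-- outside the precondition, e.g. on jishu(5, 0, 3): A returns 3, B raises ZeroDivisionError; on jishu(5, -2, 3): A returns 3, B returns 0; on jishu(7, -4, -6): A returns 7, B returns 0
import Mathlib
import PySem

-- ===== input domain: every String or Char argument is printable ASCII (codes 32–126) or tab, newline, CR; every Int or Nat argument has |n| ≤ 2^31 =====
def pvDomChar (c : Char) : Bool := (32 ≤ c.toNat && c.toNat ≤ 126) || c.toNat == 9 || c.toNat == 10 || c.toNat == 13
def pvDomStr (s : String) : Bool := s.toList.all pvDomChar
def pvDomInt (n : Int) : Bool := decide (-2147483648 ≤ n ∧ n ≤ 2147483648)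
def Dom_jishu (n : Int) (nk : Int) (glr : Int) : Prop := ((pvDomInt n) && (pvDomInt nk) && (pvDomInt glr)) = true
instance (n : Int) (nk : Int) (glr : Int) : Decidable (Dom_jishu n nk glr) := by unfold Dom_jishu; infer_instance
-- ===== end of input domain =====

-- B replaces A's O(n) step-by-step simulation of the two cyclic counters by a closed form
-- (the counters agree exactly when i mod lcm(nk,glr) < min(nk,glr)), computed via Euclid's gcd.

-- ===== PORT A =====
-- The while loop runs max(n,0) times (i goes 0,1,…); state (c, d, sum).
-- Each iteration: c,d incremented, sum bumped if c = d, then c resp. d reset on hitting nk resp. glr.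
def jishuLoop (nk glr : Int) : Nat → Int → Int → Int → Int
  | 0, _c, _d, sum => sum
  | k + 1, c, d, sum =>
      jishuLoop nk glr k
        (if c + 1 = nk then 0 else c + 1)
        (if d + 1 = glr then 0 else d + 1)
        (if c + 1 = d + 1 then sum + 1 else sum)

def jishu (n : Int) (nk : Int) (glr : Int) : Int := jishuLoop nk glr n.toNat 0 0 0

-- ===== PORT B =====
-- Python's `%` keeps the divisor's sign, so for b ≠ 0 the remainder is strictly smaller in absolute value.
theorem pyMod_natAbs_lt (a b : Int) (hb : ¬ b = 0) : (PySem.Int.mod a b).natAbs < b.natAbs := by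
  rcases lt_or_gt_of_ne hb with h | h
  · have hneg := PySem.Int.mod_neg_neg (-a) (-b)
    simp only [neg_neg] at hneg
    rw [hneg, PySem.Int.mod_eq_emod_of_pos (a := -a) (by omega)]
    have h1 := Int.emod_nonneg (-a) (by omega : (-b) ≠ 0)
    have h2 := Int.emod_lt_of_pos (-a) (by omega : 0 < -b)
    omega
  · rw [PySem.Int.mod_eq_emod_of_pos h]
    have h1 := Int.emod_nonneg a (by omega : b ≠ 0)
    have h2 := Int.emod_lt_of_pos a h
    omega

-- the `while b: a, b = b, a % b` Euclid loop of Source B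
def euclid (a b : Int) : Int :=
  if hb : b = 0 then a else euclid b (PySem.Int.mod a b)
termination_by b.natAbs
decreasing_by exact pyMod_natAbs_lt a b hb

def jishu_alt (n : Int) (nk : Int) (glr : Int) : Int :=
  if n ≤ 0 then 0
  else
    let g := euclid nk glr
    let lcm := PySem.Int.floordiv nk g * glr
    let m := min nk glr
    PySem.Int.floordiv n lcm * m + min (PySem.Int.mod n lcm) m

-- ===== PRECONDITION & SPEC =====
-- Pre_ excludes nonpositive periods nk or glr, on which A still returns a value: there a 'period'
-- is meaningless (A's counters simply never reset, an accident of its loop) and B's lcm-based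
-- algorithm divides by zero (nk = 0 or glr = 0) or does not apply.
def Pre_jishu (n : Int) (nk : Int) (glr : Int) : Prop := n ≤ 0 ∨ (1 ≤ nk ∧ 1 ≤ glr)
instance (n : Int) (nk : Int) (glr : Int) : Decidable (Pre_jishu n nk glr) := by unfold Pre_jishu; infer_instance
def pvWitness_jishu : Int × Int × Int := (10, 3, 4)

def Spec_jishu (n : Int) (nk : Int) (glr : Int) (out : Int) : Prop := out = jishu_alt n nk glr
instance (n : Int) (nk : Int) (glr : Int) (out : Int) : Decidable (Spec_jishu n nk glr out) := by unfold Spec_jishu; infer_instance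

-- ===== CLAIM (what is proved, stated in full; the proofs are below) =====
def Claim_equal_jishu : Prop := ∀ (n : Int) (nk : Int) (glr : Int), Dom_jishu n nk glr → Pre_jishu n nk glr → Spec_jishu n nk glr (jishu n nk glr)

-- ===== LEMMAS AND PROOFS =====

-- value of A's counter with modulus m (1 ≤ m) just before iteration j: j mod m
def cval (m : Int) (j : Nat) : Int := ((j % m.toNat : Nat) : Int)

-- number of the first N iterations in which A bumps sum
def Fcount (nk glr : Int) : Nat → Nat
  | 0 => 0
  | N + 1 => Fcount nk glr N + (if cval nk N = cval glr N then 1 else 0)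

theorem succ_divmod (N L : Nat) (hL : 0 < L) :
    (N % L + 1 = L ∧ (N + 1) % L = 0 ∧ (N + 1) / L = N / L + 1) ∨
    (N % L + 1 < L ∧ (N + 1) % L = N % L + 1 ∧ (N + 1) / L = N / L) := by
  have hlt : N % L < L := Nat.mod_lt N hL
  have hdm : L * (N / L) + N % L = N := Nat.div_add_mod N L
  by_cases hc : N % L + 1 = L
  · left
    refine ⟨hc, ?_, ?_⟩
    · have : N + 1 = L * (N / L + 1) := by rw [Nat.mul_add, Nat.mul_one]; omega
      rw [this, Nat.mul_mod_right]
    · have : N + 1 = L * (N / L + 1) := by rw [Nat.mul_add, Nat.mul_one]; omega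
      rw [this, Nat.mul_div_cancel_left _ hL]
  · right
    have hc2 : N % L + 1 < L := by omega
    have hrw : N + 1 = (N % L + 1) + L * (N / L) := by omega
    refine ⟨hc2, ?_, ?_⟩
    · rw [hrw, Nat.add_mul_mod_self_left, Nat.mod_eq_of_lt hc2]
    · rw [hrw, Nat.add_mul_div_left _ _ hL, Nat.div_eq_of_lt hc2, Nat.zero_add]

theorem cval_succ (m : Int) (hm : 1 ≤ m) (j : Nat) :
    cval m (j + 1) = if cval m j + 1 = m then 0 else cval m j + 1 := by
  unfold cval
  have hM : 0 < m.toNat := by omega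
  have hmM : ((m.toNat : Nat) : Int) = m := Int.toNat_of_nonneg (by omega)
  rcases succ_divmod j m.toNat hM with ⟨h1, h2, _⟩ | ⟨h1, h2, _⟩
  · rw [h2, if_pos (by omega)]
    simp
  · rw [h2, if_neg (by push_cast; omega)]
    push_cast
    ring

theorem loop_inv (nk glr : Int) (h1 : 1 ≤ nk) (h2 : 1 ≤ glr) : ∀ (k j : Nat) (s : Int),
    jishuLoop nk glr k (cval nk j) (cval glr j) s
      = s + (Fcount nk glr (j + k) : Int) - (Fcount nk glr j : Int) := by
  intro k
  induction k with
  | zero => intro j s; simp [jishuLoop]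
  | succ k ih =>
    intro j s
    rw [jishuLoop, ← cval_succ nk h1 j, ← cval_succ glr h2 j]
    rw [ih (j + 1)]
    have hF : Fcount nk glr (j + 1) = Fcount nk glr j + (if cval nk j = cval glr j then 1 else 0) := rfl
    have hj : j + 1 + k = j + (k + 1) := by omega
    rw [hj, hF]
    by_cases h : cval nk j = cval glr j
    · rw [if_pos (by omega : cval nk j + 1 = cval glr j + 1), if_pos h]
      push_cast; ring
    · rw [if_neg (by omega : ¬ cval nk j + 1 = cval glr j + 1), if_neg h]
      push_cast; ring

theorem jishu_eq_F (n nk glr : Int) (h1 : 1 ≤ nk) (h2 : 1 ≤ glr) :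
    jishu n nk glr = (Fcount nk glr n.toNat : Int) := by
  have h0 : ∀ m : Int, cval m 0 = 0 := by intro m; unfold cval; simp
  have := loop_inv nk glr h1 h2 n.toNat 0 0
  rw [h0 nk, h0 glr] at this
  simpa [jishu, Fcount] using this

theorem mod_eq_mod_iff (a b t : Nat) (ha : 0 < a) (hb : 0 < b) :
    t % a = t % b ↔ t % Nat.lcm a b < min a b := by
  have hL : 0 < Nat.lcm a b := Nat.pos_of_ne_zero (Nat.lcm_ne_zero (by omega) (by omega))
  have haL : a ≤ Nat.lcm a b := Nat.le_of_dvd hL (Nat.dvd_lcm_left a b)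
  have hbL : b ≤ Nat.lcm a b := Nat.le_of_dvd hL (Nat.dvd_lcm_right a b)
  constructor
  · intro h
    have hrt : t % a ≤ t := Nat.mod_le t a
    have hda : a ∣ t - t % a := (Nat.modEq_iff_dvd' hrt).mp (Nat.mod_modEq t a)
    have hdb : b ∣ t - t % a := by
      rw [h]; exact (Nat.modEq_iff_dvd' (h ▸ hrt)).mp (Nat.mod_modEq t b)
    have hdl : Nat.lcm a b ∣ t - t % a := Nat.lcm_dvd hda hdb
    have hmeq : t % a ≡ t [MOD Nat.lcm a b] := (Nat.modEq_iff_dvd' hrt).mpr hdl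
    have h2 : t % Nat.lcm a b = t % a := by
      have := hmeq.symm
      unfold Nat.ModEq at this
      rw [this, Nat.mod_eq_of_lt (lt_of_lt_of_le (Nat.mod_lt t ha) haL)]
    rw [h2]
    exact lt_min (Nat.mod_lt t ha) (h ▸ Nat.mod_lt t hb)
  · intro h
    have hrt : t % Nat.lcm a b ≤ t := Nat.mod_le t _
    have hdl : Nat.lcm a b ∣ t - t % Nat.lcm a b :=
      (Nat.modEq_iff_dvd' hrt).mp (Nat.mod_modEq t _)
    have key : ∀ c : Nat, c ∣ Nat.lcm a b → t % Nat.lcm a b < c → t % c = t % Nat.lcm a b := by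
      intro c hdvd hlt
      have hmeq : t % Nat.lcm a b ≡ t [MOD c] :=
        (Nat.modEq_iff_dvd' hrt).mpr (hdvd.trans hdl)
      unfold Nat.ModEq at hmeq
      rw [← hmeq, Nat.mod_eq_of_lt hlt]
    rw [key a (Nat.dvd_lcm_left a b) (lt_of_lt_of_le h (min_le_left a b)),
        key b (Nat.dvd_lcm_right a b) (lt_of_lt_of_le h (min_le_right a b))]

theorem F_both (nk glr : Int) (h1 : 1 ≤ nk) (h2 : 1 ≤ glr) (N : Nat) :
    Fcount nk glr N
      = N / Nat.lcm nk.toNat glr.toNat * min nk.toNat glr.toNat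
        + min (N % Nat.lcm nk.toNat glr.toNat) (min nk.toNat glr.toNat) := by
  have hA : 0 < nk.toNat := by omega
  have hB : 0 < glr.toNat := by omega
  have hL : 0 < Nat.lcm nk.toNat glr.toNat :=
    Nat.pos_of_ne_zero (Nat.lcm_ne_zero (by omega) (by omega))
  have hmL : min nk.toNat glr.toNat ≤ Nat.lcm nk.toNat glr.toNat :=
    le_trans (min_le_left _ _) (Nat.le_of_dvd hL (Nat.dvd_lcm_left _ _))
  have hm : 0 < min nk.toNat glr.toNat := by omega
  induction N with
  | zero => simp [Fcount]
  | succ N ih =>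
    have hcond : (cval nk N = cval glr N) ↔
        (N % Nat.lcm nk.toNat glr.toNat < min nk.toNat glr.toNat) := by
      unfold cval
      rw [Nat.cast_inj]
      exact mod_eq_mod_iff nk.toNat glr.toNat N hA hB
    have hstep : Fcount nk glr (N + 1)
        = Fcount nk glr N + (if cval nk N = cval glr N then 1 else 0) := rfl
    rw [hstep, ih]
    rcases succ_divmod N (Nat.lcm nk.toNat glr.toNat) hL with ⟨e1, e2, e3⟩ | ⟨e1, e2, e3⟩ <;>
      rw [e2, e3] <;>
      [rw [Nat.add_mul, Nat.one_mul]; skip] <;>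
      by_cases h : N % Nat.lcm nk.toNat glr.toNat < min nk.toNat glr.toNat <;>
      [rw [if_pos (hcond.mpr h)]; rw [if_neg (fun hh => h (hcond.mp hh))];
       rw [if_pos (hcond.mpr h)]; rw [if_neg (fun hh => h (hcond.mp hh))]] <;>
      (generalize N / Nat.lcm nk.toNat glr.toNat * min nk.toNat glr.toNat = x) <;>
      omega

theorem euclid_natCast : ∀ (b a : Nat), euclid (a : Int) (b : Int) = (Nat.gcd b a : Int) := by
  intro b
  induction b using Nat.strong_induction_on with
  | _ b ih =>
    intro a
    by_cases hb0 : b = 0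
    · subst hb0
      rw [euclid, dif_pos (by simp : ((0 : Nat) : Int) = 0), Nat.gcd_zero_left]
    · have hb : ¬ ((b : Int) = 0) := by simpa using hb0
      rw [euclid, dif_neg hb, PySem.Int.mod_natCast, ih (a % b) (Nat.mod_lt a (by omega)),
          Nat.gcd_rec b a]

theorem div_gcd_mul_eq_lcm (A B : Nat) (hA : 0 < A) :
    A / Nat.gcd A B * B = Nat.lcm A B := by
  have hg : 0 < Nat.gcd A B := Nat.gcd_pos_of_pos_left B hA
  rw [Nat.lcm]
  refine (Nat.div_eq_of_eq_mul_left hg ?_).symm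
  calc A * B = A / Nat.gcd A B * Nat.gcd A B * B := by
        rw [Nat.div_mul_cancel (Nat.gcd_dvd_left A B)]
    _ = A / Nat.gcd A B * B * Nat.gcd A B := by ring

-- ===== VERDICT (by name: the statement is the Claim_ definition above) =====
theorem jishu_spec : Claim_equal_jishu := by
  intro n nk glr _dom hpre
  unfold Spec_jishu jishu_alt
  by_cases hn : n ≤ 0
  · rw [if_pos hn]
    have h0 : n.toNat = 0 := by omega
    show jishuLoop nk glr n.toNat 0 0 0 = 0
    rw [h0]; rfl
  · obtain ⟨h1, h2⟩ : 1 ≤ nk ∧ 1 ≤ glr := by rcases hpre with h | h; omega; exact h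
    rw [jishu_eq_F n nk glr h1 h2, if_neg hn]
    obtain ⟨N, rfl⟩ : ∃ N : Nat, n = (N : Int) := ⟨n.toNat, (Int.toNat_of_nonneg (by omega)).symm⟩
    obtain ⟨A, rfl⟩ : ∃ A : Nat, nk = (A : Int) := ⟨nk.toNat, (Int.toNat_of_nonneg (by omega)).symm⟩
    obtain ⟨B, rfl⟩ : ∃ B : Nat, glr = (B : Int) := ⟨glr.toNat, (Int.toNat_of_nonneg (by omega)).symm⟩
    have hA : 0 < A := by omega
    show ((Fcount (A : Int) (B : Int) ((N : Int).toNat) : Nat) : Int)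
        = PySem.Int.floordiv (N : Int)
            (PySem.Int.floordiv (A : Int) (euclid (A : Int) (B : Int)) * (B : Int))
            * min (A : Int) (B : Int)
          + min (PySem.Int.mod (N : Int)
              (PySem.Int.floordiv (A : Int) (euclid (A : Int) (B : Int)) * (B : Int)))
              (min (A : Int) (B : Int))
    rw [euclid_natCast, Nat.gcd_comm B A, PySem.Int.floordiv_natCast, ← Nat.cast_mul,
        div_gcd_mul_eq_lcm A B hA, PySem.Int.floordiv_natCast, PySem.Int.mod_natCast,
        Int.toNat_natCast, F_both (A : Int) (B : Int) (by omega) (by omega) N]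
    simp only [Int.toNat_natCast]
    push_cast
    ring
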